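-- pv_equiv track=rewrite | github.com/allend2092/Spades_ML | attempt_two/version_o1/improved_spades.py | determine_winner
-- ===== SOURCE A (Python) =====
-- ranks = ["2", "3", "4", "5", "6", "7", "8", "9", "10", "Jack", "Queen", "King", "Ace"]
--
-- def determine_winner(trick, leading_suit):
--     def card_rank(card):
--         rank = card.split(" of ")[0]
--         return ranks.index(rank)
--
--     spades_played = [item for item in trick if "Spades" in item[1]]
--     if spades_played:
--         winning_card = max(spades_played, key=lambda x: card_rank(x[1]))
--         return winning_card
--     same_suit_cards = [item for item in trick if leading_suit in item[1]]
--     if same_suit_cards: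
--         winning_card = max(same_suit_cards, key=lambda x: card_rank(x[1]))
--         return winning_card
--     return trick[0]
-- ===== SOURCE B (Python) =====
-- ranks = ["2", "3", "4", "5", "6", "7", "8", "9", "10", "Jack", "Queen", "King", "Ace"]
--
-- def determine_winner(trick, leading_suit):
--     rank_of = {r: i for i, r in enumerate(ranks)}
--
--     def key(card):
--         pri = 2 if "Spades" in card[1] else 1 if leading_suit in card[1] else 0
--         return (pri, rank_of.get(card[1].split(" of ")[0], -1) if pri else 0)
--
--     best = trick[0]
--     best_key = key(best)
--     for card in trick[1:]:
--         k = key(card)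
--         if k > best_key:
--             best, best_key = card, k
--     return best
-- ===== Notes on version B (the rewrite author's own statement) =====
-- stated objective: alternative
-- what changed: Replaces A's staged filter-then-max passes by a single left-to-right scan keeping one running best card under a composite lexicographic key (priority: 2 spades / 1 leading suit / 0 other; tiebreak: rank index from a dict built once, 0 for priority-0 cards so they all tie and the first card survives).
import Mathlib
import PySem

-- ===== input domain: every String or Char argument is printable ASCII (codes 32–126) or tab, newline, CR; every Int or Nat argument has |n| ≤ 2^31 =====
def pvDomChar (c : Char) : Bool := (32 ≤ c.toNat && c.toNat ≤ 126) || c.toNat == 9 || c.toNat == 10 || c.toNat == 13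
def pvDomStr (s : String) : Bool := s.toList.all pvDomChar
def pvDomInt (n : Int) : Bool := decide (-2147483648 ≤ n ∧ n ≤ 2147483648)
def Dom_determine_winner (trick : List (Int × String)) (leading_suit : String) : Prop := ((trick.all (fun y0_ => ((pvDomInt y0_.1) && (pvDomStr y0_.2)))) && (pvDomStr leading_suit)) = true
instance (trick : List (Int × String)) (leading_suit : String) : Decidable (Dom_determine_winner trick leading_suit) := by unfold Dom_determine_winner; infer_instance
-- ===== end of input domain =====

-- B replaces A's staged filter+max passes by one running-best scan under a composite lexicographic key (alternative decomposition).

def pvRanks : List String := ["2", "3", "4", "5", "6", "7", "8", "9", "10", "Jack", "Queen", "King", "Ace"]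

-- ===== PORT A =====
-- card.split(" of ")[0] then ranks.index(...); the .getD 0 is only reached where Python raises ValueError (excluded by Pre_)
def pvCardRank (card : String) : Nat :=
  (PySem.List.index? pvRanks (((PySem.Str.split? card " of ").getD []).headD "")).getD 0

def determine_winner (trick : List (Int × String)) (leading_suit : String) : Int × String :=
  let spades_played := trick.filter (fun item => PySem.Str.isIn "Spades" item.2)
  if spades_played ≠ [] then
    (PySem.List.max? spades_played (fun x => pvCardRank x.2)).getD (0, "")
  else
    let same_suit_cards := trick.filter (fun item => PySem.Str.isIn leading_suit item.2)
    if same_suit_cards ≠ [] then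
      (PySem.List.max? same_suit_cards (fun x => pvCardRank x.2)).getD (0, "")
    else
      (PySem.List.pyGet? trick 0).getD (0, "")   -- trick[0]; IndexError (none) excluded by Pre_

-- ===== PORT B =====
-- rank_of = {r: i for i, r in enumerate(ranks)}
def pvRankDict : PySem.Dict String Int :=
  (PySem.List.enumerate pvRanks 0).foldl (fun d p => d.insert p.2 p.1) PySem.Dict.empty

-- key(card) = (pri, rank_of.get(card[1].split(" of ")[0], -1) if pri else 0)
def pvKey (leading_suit : String) (card : Int × String) : Nat × Int :=
  let pri : Nat := if PySem.Str.isIn "Spades" card.2 then 2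
                   else if PySem.Str.isIn leading_suit card.2 then 1 else 0
  (pri, if pri ≠ 0
        then pvRankDict.getD (((PySem.Str.split? card.2 " of ").getD []).headD "") (-1)
        else 0)

-- Python's lexicographic '>' on the int pair k > b
def pvKeyGt (k b : Nat × Int) : Bool := k.1 > b.1 || (k.1 == b.1 && k.2 > b.2)

def determine_winner_alt (trick : List (Int × String)) (leading_suit : String) : Int × String :=
  match trick with
  | [] => (0, "")   -- best = trick[0] raises IndexError; excluded by Pre_
  | hd :: tl =>
    (tl.foldl (fun st card =>
        let k := pvKey leading_suit card
        if pvKeyGt k st.2 then (card, k) else st)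
      (hd, pvKey leading_suit hd)).1

-- ===== PRECONDITION & SPEC =====
-- Pre_ excludes exactly the inputs where Python A raises: an empty trick with no matching card
-- (IndexError) and tricks whose consulted group (spades if any, else leading-suit cards) contains
-- a card whose rank prefix is not in ranks (ValueError from ranks.index).
def Pre_determine_winner (trick : List (Int × String)) (leading_suit : String) : Prop :=
  let spades := trick.filter (fun item => PySem.Str.isIn "Spades" item.2)
  let same := trick.filter (fun item => PySem.Str.isIn leading_suit item.2)
  if spades ≠ [] then ∀ card ∈ spades, (((PySem.Str.split? card.2 " of ").getD []).headD "") ∈ pvRanks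
  else if same ≠ [] then ∀ card ∈ same, (((PySem.Str.split? card.2 " of ").getD []).headD "") ∈ pvRanks
  else trick ≠ []

instance (trick : List (Int × String)) (leading_suit : String) : Decidable (Pre_determine_winner trick leading_suit) := by
  unfold Pre_determine_winner; infer_instance

def pvWitness_determine_winner : (List (Int × String)) × String :=
  ([(7, "Ace of Spades"), (3, "4 of Hearts")], "Hearts")

def Spec_determine_winner (trick : List (Int × String)) (leading_suit : String) (out : Int × String) : Prop := out = determine_winner_alt trick leading_suit
instance (trick : List (Int × String)) (leading_suit : String) (out : Int × String) : Decidable (Spec_determine_winner trick leading_suit out) := by unfold Spec_determine_winner; infer_instance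

-- ===== CLAIM (what is proved, stated in full; the proofs are below) =====
def Claim_equal_determine_winner : Prop := ∀ (trick : List (Int × String)) (leading_suit : String), Dom_determine_winner trick leading_suit → Pre_determine_winner trick leading_suit → Spec_determine_winner trick leading_suit (determine_winner trick leading_suit)

-- ===== LEMMAS AND PROOFS =====

-- B's running best, as a fold over an Option accumulator (proof-side view of B's loop)
def pvBestL (ls : String) (acc : Option (Int × String)) (l : List (Int × String)) : Option (Int × String) :=
  l.foldl (fun acc x => match acc with
    | none => some x
    | some m => if pvKeyGt (pvKey ls x) (pvKey ls m) then some x else some m) acc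

-- the step of PySem.List.max? with key pvCardRank ∘ Prod.snd
def pvRStep (acc : Option (Int × String)) (x : Int × String) : Option (Int × String) :=
  match acc with
  | none => some x
  | some m => if pvCardRank m.2 < pvCardRank x.2 then some x else some m

-- keep the accumulator only when it already has the top priority P
def pvProj (ls : String) (P : Nat) (acc : Option (Int × String)) : Option (Int × String) :=
  match acc with
  | none => none
  | some m => if (pvKey ls m).1 = P then some m else none

theorem pvKey_fst_le_two (ls : String) (c : Int × String) : (pvKey ls c).1 ≤ 2 := by
  simp only [pvKey]; split_ifs <;> simp

theorem pvKey_fst_eq_two_iff (ls : String) (c : Int × String) :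
    (pvKey ls c).1 = 2 ↔ PySem.Str.isIn "Spades" c.2 = true := by
  simp only [pvKey]
  split_ifs with h1 h2
  · exact iff_of_true rfl h1
  · exact iff_of_false (by simp) h1
  · exact iff_of_false (by simp) h1

theorem pvRankDict_getD_eq_index (s : String) (hs : s ∈ pvRanks) :
    pvRankDict.getD s (-1) = ((PySem.List.index? pvRanks s).getD 0 : Nat) := by
  fin_cases hs <;> decide

-- on a card whose rank prefix is valid and whose priority is positive, B's tiebreak equals A's rank
theorem pvKey_snd_eq_rank (ls : String) (c : Int × String)
    (hpri : (pvKey ls c).1 ≠ 0)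
    (hval : (((PySem.Str.split? c.2 " of ").getD []).headD "") ∈ pvRanks) :
    (pvKey ls c).2 = (pvCardRank c.2 : Int) := by
  have hd := pvRankDict_getD_eq_index _ hval
  unfold pvKey at *
  unfold pvCardRank
  dsimp only at *
  split_ifs at * with h1 h2 <;> simp_all

-- B's pair fold computes pvBestL (the snd component caches the key of the fst)
theorem foldl_pair_eq_bestL (ls : String) (tl : List (Int × String)) (hd : Int × String) :
    ∃ m, pvBestL ls (some hd) tl = some m ∧
      tl.foldl (fun st card =>
          let k := pvKey ls card
          if pvKeyGt k st.2 then (card, k) else st)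
        (hd, pvKey ls hd) = (m, pvKey ls m) := by
  induction tl generalizing hd with
  | nil => exact ⟨hd, rfl, rfl⟩
  | cons x xs ih =>
    simp only [List.foldl_cons, pvBestL]
    by_cases h : pvKeyGt (pvKey ls x) (pvKey ls hd) = true
    · simpa [pvBestL, h] using ih x
    · simp only [Bool.not_eq_true] at h
      simpa [pvBestL, h] using ih hd

-- the invariant on the accumulator: priority ≤ P and, at priority P, tiebreak = A's rank
def pvInv (ls : String) (P : Nat) (acc : Option (Int × String)) : Prop :=
  ∀ m, acc = some m → (pvKey ls m).1 ≤ P ∧ ((pvKey ls m).1 = P → (pvKey ls m).2 = (pvCardRank m.2 : Int))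

-- WORKHORSE: projecting B's running best onto the priority-P cards is A's max?-fold over the filtered list
theorem pvProj_bestL (ls : String) (P : Nat) (p : (Int × String) → Bool)
    (l : List (Int × String)) (acc : Option (Int × String))
    (hple : ∀ x ∈ l, (pvKey ls x).1 ≤ P)
    (hp : ∀ x ∈ l, (p x = true ↔ (pvKey ls x).1 = P))
    (hrank : ∀ x ∈ l, p x = true → (pvKey ls x).2 = (pvCardRank x.2 : Int))
    (hacc : pvInv ls P acc) :
    pvProj ls P (pvBestL ls acc l) = (l.filter p).foldl pvRStep (pvProj ls P acc) := by
  induction l generalizing acc with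
  | nil => simp [pvBestL]
  | cons x xs ih =>
    have hxle := hple x (by simp)
    have hxp := hp x (by simp)
    have hxr := hrank x (by simp)
    have hple' : ∀ y ∈ xs, (pvKey ls y).1 ≤ P := fun y hy => hple y (by simp [hy])
    have hp' : ∀ y ∈ xs, (p y = true ↔ (pvKey ls y).1 = P) := fun y hy => hp y (by simp [hy])
    have hrank' : ∀ y ∈ xs, p y = true → (pvKey ls y).2 = (pvCardRank y.2 : Int) :=
      fun y hy => hrank y (by simp [hy])
    simp only [pvBestL, List.foldl_cons, List.filter_cons]
    rcases hA : acc with _ | m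
    · -- acc = none: step takes x
      have hinv : pvInv ls P (some x) := by
        intro m hm; cases hm; exact ⟨hxle, fun h => hxr (hxp.mpr h)⟩
      by_cases hpx : p x = true
      · have hPx : (pvKey ls x).1 = P := hxp.mp hpx
        have := ih (some x) hple' hp' hrank' hinv
        simpa [pvBestL, hpx, pvProj, hPx, pvRStep] using this
      · have hPx : (pvKey ls x).1 ≠ P := fun h => hpx (hxp.mpr h)
        have := ih (some x) hple' hp' hrank' hinv
        simp only [Bool.not_eq_true] at hpx
        simpa [pvBestL, hpx, pvProj, hPx] using this
    · obtain ⟨hmle, hmr⟩ := hacc m hA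
      by_cases hpx : p x = true
      · have hPx : (pvKey ls x).1 = P := hxp.mp hpx
        by_cases hPm : (pvKey ls m).1 = P
        · -- both at priority P: lex comparison is the rank comparison
          have hgt : pvKeyGt (pvKey ls x) (pvKey ls m)
              = decide (pvCardRank m.2 < pvCardRank x.2) := by
            have h2 := hxr hpx
            have h2m := hmr hPm
            simp [pvKeyGt, hPx, hPm, h2, h2m]
            try omega
          have hinvx : pvInv ls P (some x) := by
            intro m' hm'; cases hm'; exact ⟨hxle, fun _ => hxr hpx⟩
          have hinvm : pvInv ls P (some m) := by
            intro m' hm'; cases hm'; exact ⟨hmle, hmr⟩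
          by_cases hcmp : pvCardRank m.2 < pvCardRank x.2
          · have := ih (some x) hple' hp' hrank' hinvx
            simpa [pvBestL, hgt, hcmp, hpx, pvProj, hPx, hPm, pvRStep] using this
          · have := ih (some m) hple' hp' hrank' hinvm
            simpa [pvBestL, hgt, hcmp, hpx, pvProj, hPx, hPm, pvRStep] using this
        · -- m below P, x at P: x wins
          have hgt : pvKeyGt (pvKey ls x) (pvKey ls m) = true := by
            simp [pvKeyGt]; omega
          have hinvx : pvInv ls P (some x) := by
            intro m' hm'; cases hm'; exact ⟨hxle, fun _ => hxr hpx⟩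
          have := ih (some x) hple' hp' hrank' hinvx
          simpa [pvBestL, hgt, hpx, pvProj, hPx, hPm, pvRStep] using this
      · -- x below P: the projection ignores whoever wins
        have hPx : (pvKey ls x).1 ≠ P := fun h => hpx (hxp.mpr h)
        have hxlt : (pvKey ls x).1 < P := lt_of_le_of_ne hxle hPx
        by_cases hPm : (pvKey ls m).1 = P
        · have hgt : pvKeyGt (pvKey ls x) (pvKey ls m) = false := by
            simp [pvKeyGt]; omega
          have hinvm : pvInv ls P (some m) := fun m' hm' => by cases hm'; exact ⟨hmle, hmr⟩
          have := ih (some m) hple' hp' hrank' hinvm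
          simp only [Bool.not_eq_true] at hpx
          simpa [pvBestL, hgt, hpx] using this
        · -- both below P: projection is none either way
          rcases hgt : pvKeyGt (pvKey ls x) (pvKey ls m) with _ | _
          · have hinvm : pvInv ls P (some m) := fun m' hm' => by cases hm'; exact ⟨hmle, hmr⟩
            have := ih (some m) hple' hp' hrank' hinvm
            simp only [Bool.not_eq_true] at hpx
            simpa [pvBestL, hgt, hpx, pvProj, hPm] using this
          · have hinvx : pvInv ls P (some x) := by
              intro m' hm'; cases hm'
              exact ⟨hxle, fun h => absurd h hPx⟩
            have := ih (some x) hple' hp' hrank' hinvx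
            simp only [Bool.not_eq_true] at hpx
            simpa [pvBestL, hgt, hpx, pvProj, hPm, hPx] using this

theorem max?_eq_foldl_rstep (l : List (Int × String)) :
    PySem.List.max? l (fun x => pvCardRank x.2) = l.foldl pvRStep none := by
  simp only [PySem.List.max?]
  exact PySem.List.foldl_congr_mem _ _ _ _ (fun acc x _ => by cases acc <;> rfl)

-- all-priority-zero tricks: B's loop never replaces the first card
theorem bestL_of_all_zero (ls : String) (tl : List (Int × String)) (hd : Int × String)
    (h : ∀ x ∈ tl, pvKey ls x = (0, 0)) (hhd : pvKey ls hd = (0, 0)) :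
    tl.foldl (fun st card =>
        let k := pvKey ls card
        if pvKeyGt k st.2 then (card, k) else st)
      (hd, pvKey ls hd) = (hd, pvKey ls hd) := by
  induction tl with
  | nil => rfl
  | cons x xs ih =>
    have hx := h x (by simp)
    simp only [List.foldl_cons, hx, hhd]
    have hgt : pvKeyGt (0, 0) (0, 0) = false := by decide
    simp only [hgt, if_neg (Bool.false_ne_true)]
    simp only [hhd] at ih ⊢
    exact ih (fun y hy => h y (by simp [hy]))

-- ===== VERDICT (by name: the statement is the Claim_ definition above) =====
theorem pvInv_none (ls : String) (P : Nat) : pvInv ls P none :=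
  fun _ h => nomatch h

theorem determine_winner_spec : Claim_equal_determine_winner := by
  intro trick ls _ hpre
  unfold Spec_determine_winner
  cases trick with
  | nil => rfl
  | cons hd tl =>
  obtain ⟨M, hM, hfold⟩ := foldl_pair_eq_bestL ls tl hd
  have halt : determine_winner_alt (hd :: tl) ls = M := by
    simp only [determine_winner_alt, hfold]
  have hbest : pvBestL ls none (hd :: tl) = some M := by
    simpa [pvBestL] using hM
  rw [halt]
  unfold Pre_determine_winner at hpre
  simp only [] at hpre
  unfold determine_winner
  simp only []
  by_cases hsp : (hd :: tl).filter (fun item => PySem.Str.isIn "Spades" item.2) ≠ []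
  · -- spades present: P = 2
    rw [if_pos hsp] at hpre ⊢
    have hproj := pvProj_bestL ls 2 (fun item => PySem.Str.isIn "Spades" item.2) (hd :: tl) none
      (fun x _ => pvKey_fst_le_two ls x)
      (fun x _ => (pvKey_fst_eq_two_iff ls x).symm)
      (fun x hx hpx => pvKey_snd_eq_rank ls x
        (by rw [(pvKey_fst_eq_two_iff ls x).mpr hpx]; omega)
        (hpre x (List.mem_filter.mpr ⟨hx, hpx⟩)))
      (pvInv_none ls 2)
    rw [hbest] at hproj
    rw [show pvProj ls 2 none = none from rfl, ← max?_eq_foldl_rstep] at hproj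
    by_cases hP : (pvKey ls M).1 = 2
    · rw [show pvProj ls 2 (some M) = some M from by simp [pvProj, hP]] at hproj
      rw [← hproj]; rfl
    · rw [show pvProj ls 2 (some M) = none from by simp [pvProj, hP]] at hproj
      exact absurd ((PySem.List.max?_eq_none_iff _ _).mp hproj.symm) hsp
  · -- no spades
    rw [if_neg hsp] at hpre ⊢
    rw [not_not] at hsp
    have hnospade : ∀ x ∈ (hd :: tl), PySem.Str.isIn "Spades" x.2 = false := by
      intro x hx
      exact Bool.not_eq_true _ |>.mp (List.filter_eq_nil_iff.mp hsp x hx)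
    have hkey1 : ∀ x ∈ (hd :: tl),
        (pvKey ls x).1 = if PySem.Str.isIn ls x.2 then 1 else 0 := by
      intro x hx
      simp only [pvKey, hnospade x hx]
      simp
    by_cases hsame : (hd :: tl).filter (fun item => PySem.Str.isIn ls item.2) ≠ []
    · -- leading suit present: P = 1
      rw [if_pos hsame] at hpre ⊢
      have hproj := pvProj_bestL ls 1 (fun item => PySem.Str.isIn ls item.2) (hd :: tl) none
        (fun x hx => by rw [hkey1 x hx]; split_ifs <;> omega)
        (fun x hx => by
          rw [hkey1 x hx]
          by_cases h : PySem.Str.isIn ls x.2 = true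
          · simp
          · simp only [Bool.not_eq_true] at h
            simp)
        (fun x hx hpx => pvKey_snd_eq_rank ls x
          (by rw [hkey1 x hx, if_pos hpx]; omega)
          (hpre x (List.mem_filter.mpr ⟨hx, hpx⟩)))
        (pvInv_none ls 1)
      rw [hbest] at hproj
      rw [show pvProj ls 1 none = none from rfl, ← max?_eq_foldl_rstep] at hproj
      by_cases hP : (pvKey ls M).1 = 1
      · rw [show pvProj ls 1 (some M) = some M from by simp [pvProj, hP]] at hproj
        rw [← hproj]; rfl
      · rw [show pvProj ls 1 (some M) = none from by simp [pvProj, hP]] at hproj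
        exact absurd ((PySem.List.max?_eq_none_iff _ _).mp hproj.symm) hsame
    · -- trick[0]
      rw [if_neg hsame] at hpre ⊢
      rw [not_not] at hsame
      have hnosame : ∀ x ∈ (hd :: tl), PySem.Str.isIn ls x.2 = false := by
        intro x hx
        exact Bool.not_eq_true _ |>.mp (List.filter_eq_nil_iff.mp hsame x hx)
      have hzero : ∀ x ∈ (hd :: tl), pvKey ls x = (0, 0) := by
        intro x hx
        simp only [pvKey, hnospade x hx, hnosame x hx]
        simp
      have hfix := bestL_of_all_zero ls tl hd
        (fun x hx => hzero x (by simp [hx])) (hzero hd (by simp))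
      have : M = hd := by
        have := hfold.symm.trans hfix
        exact (Prod.mk.injEq _ _ _ _ ▸ congrArg Prod.fst this)
      rw [this]
      simp
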